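-- pv_equiv track=rewrite | github.com/kishankumar-dev/GFG_work | Difficulty: Medium/Check if frequencies can be equal/check-if-frequencies-can-be-equal.py | sameFreq
-- ===== SOURCE A (Python) =====
-- from collections import Counter
--
-- def sameFreq(s: str) -> bool:
--     ctr=Counter(s)
--     if len(set(ctr.values()))==1:
--         return True
--     for key in ctr.keys():
--         ctr[key]-=1
--         st=set(ctr.values())
--         st.discard(0)
--         if len(st)==1:
--             return True
--         ctr[key]+=1
--     return False
-- ===== SOURCE B (Python) =====
-- from collections import Counter
--
-- def sameFreq(s: str) -> bool:
--     ctr = Counter(s)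
--     ff = Counter(ctr.values())
--     if len(ff) == 1:
--         return True
--     if len(ff) != 2:
--         return False
--     f1, f2 = sorted(ff)
--     return (f1 == 1 and ff[f1] == 1) or (f2 == f1 + 1 and ff[f2] == 1)
-- ===== Notes on version B (the rewrite author's own statement) =====
-- stated objective: simpler
-- what changed: Instead of trying to decrement each character's count and re-checking the value set (A), B builds the frequency-of-frequencies table once and decides by a closed-form condition on its (at most two) distinct frequencies.
import Mathlib
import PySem

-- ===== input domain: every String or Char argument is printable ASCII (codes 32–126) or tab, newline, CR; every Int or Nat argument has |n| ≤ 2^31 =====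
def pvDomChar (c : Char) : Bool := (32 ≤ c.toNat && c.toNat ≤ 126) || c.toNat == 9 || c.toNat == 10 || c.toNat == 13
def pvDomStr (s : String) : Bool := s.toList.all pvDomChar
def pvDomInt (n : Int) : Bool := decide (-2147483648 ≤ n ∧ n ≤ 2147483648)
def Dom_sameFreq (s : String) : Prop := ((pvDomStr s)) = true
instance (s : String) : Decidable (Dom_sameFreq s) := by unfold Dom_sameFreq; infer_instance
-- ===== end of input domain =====

-- B replaces A's try-each-character-decrement loop by a direct closed-form test on the
-- frequency-of-frequencies table (objective: simpler).

-- ===== PORT A =====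
-- the 'for key in ctr.keys(): ctr[key]-=1; …; ctr[key]+=1' loop (the decrement is undone
-- before the next iteration, so each step checks a one-key-decremented copy of ctr)
def sameFreqLoop (ctr : PySem.Dict Char Int) : List Char → Bool
  | [] => false
  | k :: ks =>
    let d := ctr.modify k 0 (· - 1)
    let st := PySem.Set.discard (PySem.Set.ofList d.values) 0
    if PySem.Set.len st == 1 then true
    else sameFreqLoop ctr ks

def sameFreq (s : String) : Bool :=
  let ctr := PySem.Dict.counter s.toList
  if PySem.Set.len (PySem.Set.ofList ctr.values) == 1 then true
  else sameFreqLoop ctr ctr.keys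

-- ===== PORT B =====
def sameFreq_alt (s : String) : Bool :=
  let ctr := PySem.Dict.counter s.toList
  let ff := PySem.Dict.counter ctr.values
  if ff.size == 1 then true
  else if ff.size != 2 then false
  else
    match PySem.List.sorted ff.keys (fun x => x) with
    | [f1, f2] => (f1 == 1 && ff.getD f1 0 == 1) || (f2 == f1 + 1 && ff.getD f2 0 == 1)
    | _ => false   -- unreachable: ff.size = 2, so ff.keys has exactly two elements

-- ===== PRECONDITION & SPEC =====
def Spec_sameFreq (s : String) (out : Bool) : Prop := out = sameFreq_alt s
instance (s : String) (out : Bool) : Decidable (Spec_sameFreq s out) := by unfold Spec_sameFreq; infer_instance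

-- ===== CLAIM (what is proved, stated in full; the proofs are below) =====
def Claim_equal_sameFreq : Prop := ∀ (s : String), Dom_sameFreq s → Spec_sameFreq s (sameFreq s)

-- ===== LEMMAS AND PROOFS =====

-- the early-return loop is List.any
lemma sameFreqLoop_eq_any (ctr : PySem.Dict Char Int) (ks : List Char) :
    sameFreqLoop ctr ks = ks.any (fun k =>
      PySem.Set.len (PySem.Set.discard
        (PySem.Set.ofList (ctr.modify k 0 (· - 1)).values) 0) == 1) := by
  induction ks with
  | nil => rfl
  | cons k ks ih =>
    simp only [sameFreqLoop, List.any_cons, ih]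
    cases hc : (PySem.Set.len (PySem.Set.discard
        (PySem.Set.ofList (ctr.modify k 0 (· - 1)).values) 0) == 1) <;> simp_all

-- a Nodup list has length 1 iff it has a unique member
lemma nodup_length_one_iff {α : Type} {L : List α} (h : L.Nodup) :
    L.length = 1 ↔ ∃ x, x ∈ L ∧ ∀ y ∈ L, y = x := by
  constructor
  · intro hl
    match L, hl with
    | [x], _ => exact ⟨x, by simp, by simp⟩
  · rintro ⟨x, hx, hall⟩
    match L, h with
    | [y], _ => rfl
    | y :: z :: t, h =>
      exfalso
      have hy := hall y (by simp)
      have hz := hall z (by simp)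
      simp [List.nodup_cons] at h
      exact h.1.1 (hy.trans hz.symm)

-- a Nodup list whose members all lie in {a, b} has length ≤ 2
lemma nodup_length_le_two {L : List Int} (h : L.Nodup) (a b : Int)
    (hall : ∀ y ∈ L, y = a ∨ y = b) : L.length ≤ 2 := by
  match L, h with
  | [], _ => simp
  | [_], _ => simp
  | [_, _], _ => simp
  | x :: y :: z :: t, h =>
    exfalso
    simp [List.nodup_cons] at h
    rcases hall x (by simp) with hx | hx <;> rcases hall y (by simp) with hy | hy <;>
      rcases hall z (by simp) with hz | hz <;>
      first
      | exact h.1.1 (hx.trans hy.symm)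
      | exact h.1.2.1 (hx.trans hz.symm)
      | exact h.2.1.1 (hy.trans hz.symm)

lemma discard_len_one_iff (xs : List Int) :
    (PySem.Set.len (PySem.Set.discard (PySem.Set.ofList xs) 0) == 1) = true ↔
      ∃ x, x ≠ 0 ∧ x ∈ xs ∧ ∀ y ∈ xs, y = 0 ∨ y = x := by
  have hn := PySem.Set.nodup_discard (PySem.Set.ofList xs) 0 (PySem.Set.nodup_ofList xs)
  rw [show (PySem.Set.len (PySem.Set.discard (PySem.Set.ofList xs) 0) == 1) = true ↔
      (PySem.Set.discard (PySem.Set.ofList xs) 0).length = 1 by simp [PySem.Set.len]]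
  rw [nodup_length_one_iff hn]
  simp only [PySem.Set.mem_discard, PySem.Set.mem_ofList]
  constructor
  · rintro ⟨x, ⟨hx, hx0⟩, hall⟩
    exact ⟨x, hx0, hx, fun y hy => by
      by_cases h0 : y = 0
      · exact Or.inl h0
      · exact Or.inr (hall y ⟨hy, h0⟩)⟩
  · rintro ⟨x, hx0, hx, hall⟩
    exact ⟨x, ⟨hx, hx0⟩, fun y ⟨hy, hy0⟩ => (hall y hy).resolve_left hy0⟩


-- count of a value in K.map g, for Nodup K, is 1 iff k is its unique preimage
lemma count_map_one_iff (K : List Char) (g : Char → Int) (hK : K.Nodup)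
    (k : Char) (hk : k ∈ K) :
    (K.map g).count (g k) = 1 ↔ ∀ j ∈ K, j ≠ k → g j ≠ g k := by
  rw [List.count, List.countP_map, List.countP_eq_length_filter]
  have hF : (List.filter ((fun x => x == g k) ∘ g) K) = K.filter (fun j => g j == g k) := rfl
  rw [hF]
  have hnF : (K.filter (fun j => g j == g k)).Nodup := hK.filter _
  have hkF : k ∈ K.filter (fun j => g j == g k) := by
    simp [List.mem_filter, hk]
  rw [nodup_length_one_iff hnF]
  constructor
  · rintro ⟨x, hxF, hall⟩ j hj hjk hgj
    have hx := hall k hkF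
    have hj' : j ∈ K.filter (fun j => g j == g k) := by simp [List.mem_filter, hj, hgj]
    exact hjk ((hall j hj').trans hx.symm)
  · intro h
    refine ⟨k, hkF, fun j hj => ?_⟩
    simp only [List.mem_filter, beq_iff_eq] at hj
    by_contra hne
    exact h j hj.1 hne hj.2
-- the values list of ctr after 'ctr[k] -= 1'
lemma values_modify_dec (ctr : PySem.Dict Char Int) (k : Char)
    (hK : ctr.keys.Nodup) (hk : k ∈ ctr.keys) :
    (ctr.modify k 0 (· - 1)).values =
      ctr.keys.map (fun j => if j = k then ctr.getD k 0 - 1 else ctr.getD j 0) := by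
  have hkeys : (ctr.modify k 0 (· - 1)).keys = ctr.keys := by
    rw [PySem.Dict.keys_modify, PySem.Dict.keys_insert_of_contains]
    exact (PySem.Dict.contains_iff_mem_keys _ _).mpr hk
  rw [PySem.Dict.values_eq_map_keys _ (by rw [hkeys]; exact hK) 0, hkeys]
  apply List.map_congr_left
  intro j hj
  exact PySem.Dict.getD_modify ctr k j 0 (· - 1)

-- the heart of the n = 2 case: A's decrement-try succeeds iff B's closed form holds
lemma two_freq (K : List Char) (g : Char → Int) (hK : K.Nodup)
    (hg : ∀ j ∈ K, 1 ≤ g j) (f1 f2 : Int) (h12 : f1 < f2)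
    (hf1 : f1 ∈ K.map g) (hf2 : f2 ∈ K.map g)
    (hmem : ∀ y ∈ K.map g, y = f1 ∨ y = f2) :
    (∃ k ∈ K, (PySem.Set.len (PySem.Set.discard
        (PySem.Set.ofList (K.map (fun j => if j = k then g k - 1 else g j))) 0) == 1) = true)
    ↔ ((f1 = 1 ∧ (K.map g).count f1 = 1) ∨ (f2 = f1 + 1 ∧ (K.map g).count f2 = 1)) := by
  have hpos : ∀ y ∈ K.map g, 1 ≤ y := by
    rintro y hy; rcases List.mem_map.1 hy with ⟨j, hj, rfl⟩; exact hg j hj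
  have h1pos : 1 ≤ f1 := hpos f1 hf1
  constructor
  · rintro ⟨k, hkK, hlen⟩
    rw [discard_len_one_iff] at hlen
    rcases hlen with ⟨x, hx0, hxmem, hall⟩
    -- the decremented-value list
    set xs := K.map (fun j => if j = k then g k - 1 else g j) with hxs
    have hdec : g k - 1 ∈ xs := by
      rw [hxs]; exact List.mem_map.2 ⟨k, hkK, by simp⟩
    have hother : ∀ w, w ∈ K.map g → w ≠ g k → w ∈ xs := by
      intro w hw hwk
      rcases List.mem_map.1 hw with ⟨j, hj, rfl⟩
      have hjk : j ≠ k := fun h => hwk (h ▸ rfl)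
      exact List.mem_map.2 ⟨j, hj, by simp [hjk]⟩
    have hcnt : ∀ v, g k = v → (K.map g).count v = 1 := by
      rintro v rfl
      rw [count_map_one_iff K g hK k hkK]
      intro j hj hjk hgj
      have hvxs : g k ∈ xs := List.mem_map.2 ⟨j, hj, by simp [hjk, hgj]⟩
      have hvx : g k = x := by
        rcases hall _ hvxs with h0 | h
        · exact absurd h0 (by have := hg k hkK; omega)
        · exact h
      -- the other frequency also equals x, contradiction
      rcases hmem (g k) (List.mem_map.2 ⟨k, hkK, rfl⟩) with hv1 | hv2
      · have : f2 ∈ xs := hother f2 hf2 (by omega)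
        rcases hall _ this with h0 | h
        · omega
        · omega
      · have : f1 ∈ xs := hother f1 hf1 (by omega)
        rcases hall _ this with h0 | h
        · omega
        · omega
    rcases hmem (g k) (List.mem_map.2 ⟨k, hkK, rfl⟩) with hv | hv
    · -- g k = f1 : show f1 = 1 and count f1 = 1
      left
      have hc1 : (K.map g).count f1 = 1 := hcnt f1 hv
      have hf2x : f2 = x := by
        have : f2 ∈ xs := hother f2 hf2 (by omega)
        rcases hall _ this with h0 | h
        · omega
        · exact h
      have : g k - 1 = 0 ∨ g k - 1 = x := hall _ hdec
      constructor
      · omega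
      · exact hc1
    · -- g k = f2 : show f2 = f1 + 1 and count f2 = 1
      right
      have hc2 : (K.map g).count f2 = 1 := hcnt f2 hv
      have hf1x : f1 = x := by
        have : f1 ∈ xs := hother f1 hf1 (by omega)
        rcases hall _ this with h0 | h
        · omega
        · exact h
      have : g k - 1 = 0 ∨ g k - 1 = x := hall _ hdec
      constructor
      · omega
      · exact hc2
  · rintro (⟨h1, hc⟩ | ⟨hsucc, hc⟩)
    · -- f1 = 1 with a unique carrier k: decrementing k leaves only f2
      rcases List.mem_map.1 hf1 with ⟨k, hkK, hgk⟩
      refine ⟨k, hkK, ?_⟩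
      rw [discard_len_one_iff]
      have hnok : ∀ j ∈ K, j ≠ k → g j ≠ f1 := by
        rw [← hgk] at hc ⊢
        exact (count_map_one_iff K g hK k hkK).1 hc
      refine ⟨f2, by omega, ?_, ?_⟩
      · rcases List.mem_map.1 hf2 with ⟨j, hj, hgj⟩
        have hjk : j ≠ k := by rintro rfl; omega
        exact List.mem_map.2 ⟨j, hj, by simp [hjk, hgj]⟩
      · intro y hy
        rcases List.mem_map.1 hy with ⟨j, hj, hgj⟩
        by_cases hjk : j = k
        · subst hjk; rw [if_pos rfl] at hgj; omega
        · simp only [if_neg hjk] at hgj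
          rcases hmem (g j) (List.mem_map.2 ⟨j, hj, rfl⟩) with h | h
          · exact absurd h (hnok j hj hjk)
          · omega
    · -- f2 = f1 + 1 with a unique carrier k: decrementing k leaves only f1
      rcases List.mem_map.1 hf2 with ⟨k, hkK, hgk⟩
      refine ⟨k, hkK, ?_⟩
      rw [discard_len_one_iff]
      have hnok : ∀ j ∈ K, j ≠ k → g j ≠ f2 := by
        rw [← hgk] at hc ⊢
        exact (count_map_one_iff K g hK k hkK).1 hc
      refine ⟨f1, by omega, ?_, ?_⟩
      · rcases List.mem_map.1 hf1 with ⟨j, hj, hgj⟩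
        have hjk : j ≠ k := by rintro rfl; omega
        exact List.mem_map.2 ⟨j, hj, by simp [hjk, hgj]⟩
      · intro y hy
        rcases List.mem_map.1 hy with ⟨j, hj, hgj⟩
        by_cases hjk : j = k
        · subst hjk; rw [if_pos rfl] at hgj; omega
        · simp only [if_neg hjk] at hgj
          rcases hmem (g j) (List.mem_map.2 ⟨j, hj, rfl⟩) with h | h
          · omega
          · exact absurd h (hnok j hj hjk)

-- abstract form of the equivalence, over the key list and the count function
lemma core_eq (K : List Char) (g : Char → Int) (hK : K.Nodup)
    (hg : ∀ j ∈ K, 1 ≤ g j) :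
    (if PySem.Set.len (PySem.Set.ofList (K.map g)) == 1 then true
     else K.any fun k => PySem.Set.len (PySem.Set.discard
        (PySem.Set.ofList (K.map (fun j => if j = k then g k - 1 else g j))) 0) == 1)
    =
    (if (PySem.Set.ofList (K.map g)).length == 1 then true
     else if (PySem.Set.ofList (K.map g)).length != 2 then false
     else match PySem.List.sorted (PySem.Set.ofList (K.map g)) (fun x => x) with
       | [f1, f2] => (f1 == 1 && ((K.map g).count f1 : Int) == 1)
                      || (f2 == f1 + 1 && ((K.map g).count f2 : Int) == 1)
       | _ => false) := by
  have hnd := PySem.Set.nodup_ofList (K.map g)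
  have hpos : ∀ y ∈ K.map g, 1 ≤ y := by
    rintro y hy; rcases List.mem_map.1 hy with ⟨j, hj, rfl⟩; exact hg j hj
  cases hS : PySem.Set.ofList (K.map g) with
  | nil =>
    have hvs : K.map g = [] := by
      cases hv : K.map g with
      | nil => rfl
      | cons x t =>
        exfalso
        have : x ∈ PySem.Set.ofList (K.map g) := (PySem.Set.mem_ofList _ _).2 (by rw [hv]; simp)
        rw [hS] at this; simp at this
    have hKnil : K = [] := List.map_eq_nil_iff.1 hvs
    simp [PySem.Set.len, hKnil]
  | cons p t =>
    cases t with
    | nil => simp [PySem.Set.len]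
    | cons q t2 =>
      rw [hS] at hnd
      have hmemS : ∀ y, y ∈ K.map g ↔ y ∈ p :: q :: t2 := by
        intro y; rw [← hS, PySem.Set.mem_ofList]
      cases t2 with
      | nil =>
        -- exactly two distinct frequencies
        have hpq : p ≠ q := by
          have h := (List.nodup_cons.mp hnd).1; simp at h; exact h
        have hp : p ∈ K.map g := (hmemS p).2 (by simp)
        have hq : q ∈ K.map g := (hmemS q).2 (by simp)
        have hmem : ∀ y ∈ K.map g, y = p ∨ y = q := by
          intro y hy; have := (hmemS y).1 hy; simpa using this
        have hlhs : (PySem.Set.len [p, q] == 1) = false := by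
          simp [PySem.Set.len]
        rw [hlhs]
        have hrhs1 : (([p, q] : List Int).length == 1) = false := by simp
        have hrhs2 : (([p, q] : List Int).length != 2) = false := by simp
        rw [hrhs1, hrhs2]
        simp only [Bool.false_eq_true, if_false]
        rcases lt_or_gt_of_ne hpq with hlt | hgt
        · have hsorted : PySem.List.sorted [p, q] (fun x => x) = [p, q] :=
            PySem.List.sorted_eq_of_perm_of_pairwise_lt _ _ _ (List.Perm.refl _)
              (by simp [hlt])
          rw [hsorted]
          rw [Bool.eq_iff_iff, List.any_eq_true]
          have h2f := two_freq K g hK hg p q hlt hp hq hmem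
          simp only [Bool.or_eq_true, Bool.and_eq_true, beq_iff_eq, Nat.cast_eq_one]
          simp only [beq_iff_eq] at h2f
          exact h2f
        · have hsorted : PySem.List.sorted [p, q] (fun x => x) = [q, p] :=
            PySem.List.sorted_eq_of_perm_of_pairwise_lt _ _ _ (List.Perm.swap _ _ _)
              (by simp [hgt])
          rw [hsorted]
          rw [Bool.eq_iff_iff, List.any_eq_true]
          have h2f := two_freq K g hK hg q p hgt hq hp
            (fun y hy => (hmem y hy).symm)
          simp only [Bool.or_eq_true, Bool.and_eq_true, beq_iff_eq, Nat.cast_eq_one]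
          simp only [beq_iff_eq] at h2f
          exact h2f
      | cons r t3 =>
        -- three or more distinct frequencies: both sides are false
        have hlhs : (PySem.Set.len (p :: q :: r :: t3) == 1) = false := by
          simp [PySem.Set.len]; omega
        have hrhs1 : ((p :: q :: r :: t3 : List Int).length == 1) = false := by simp
        have hrhs2 : ((p :: q :: r :: t3 : List Int).length != 2) = true := by
          simp only [bne_iff_ne, ne_eq, List.length_cons]; omega
        rw [hlhs, hrhs1, hrhs2]
        simp only [Bool.false_eq_true, if_false, if_true]
        rw [List.any_eq_false]
        intro k hkK
        simp only [Bool.not_eq_true]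
        rw [Bool.eq_false_iff]
        intro hlen
        rw [discard_len_one_iff] at hlen
        rcases hlen with ⟨x, hx0, hxmem, hall⟩
        have hsub : ∀ y ∈ p :: q :: r :: t3, y = g k ∨ y = x := by
          intro y hy
          have hyvs : y ∈ K.map g := (hmemS y).2 hy
          by_cases hyk : y = g k
          · exact Or.inl hyk
          · right
            rcases List.mem_map.1 hyvs with ⟨j, hj, rfl⟩
            have hjk : j ≠ k := fun h => hyk (h ▸ rfl)
            have : g j ∈ K.map (fun j => if j = k then g k - 1 else g j) :=
              List.mem_map.2 ⟨j, hj, by simp [hjk]⟩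
            rcases hall _ this with h0 | h
            · exact absurd h0 (by have := hg j hj; omega)
            · exact h
        have := nodup_length_le_two hnd (g k) x hsub
        simp [List.length_cons] at this

-- ===== VERDICT (by name: the statement is the Claim_ definition above) =====
theorem sameFreq_spec : Claim_equal_sameFreq := by
  intro s _
  unfold Spec_sameFreq sameFreq sameFreq_alt
  have hK : (PySem.Dict.counter s.toList).keys.Nodup := PySem.Dict.nodup_keys_counter _
  have hg : ∀ j ∈ (PySem.Dict.counter s.toList).keys, 1 ≤ (PySem.Dict.counter s.toList).getD j 0 := by
    intro j hj
    rw [PySem.Dict.getD_counter]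
    rw [PySem.Dict.keys_counter, PySem.Set.mem_ofList] at hj
    have := List.count_pos_iff.2 hj
    omega
  have hvals : (PySem.Dict.counter s.toList).values =
      (PySem.Dict.counter s.toList).keys.map (fun j => (PySem.Dict.counter s.toList).getD j 0) :=
    PySem.Dict.values_eq_map_keys _ hK 0
  simp only [sameFreqLoop_eq_any]
  rw [PySem.List.any_congr_mem (fun k hk => by
    rw [values_modify_dec (PySem.Dict.counter s.toList) k hK hk])]
  rw [hvals]
  simp only [PySem.Dict.size, PySem.Dict.items_counter, List.length_map,
    PySem.Dict.keys_counter, PySem.Dict.getD_counter]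
  exact core_eq (PySem.Set.ofList s.toList) (fun j => ((s.toList.count j : Nat) : Int))
    (PySem.Set.nodup_ofList _)
    (fun j hj => by
      rw [PySem.Set.mem_ofList] at hj
      have := List.count_pos_iff.2 hj
      show (1:Int) ≤ ((s.toList.count j : Nat) : Int)
      omega)
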